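-- pv_equiv track=rewrite | github.com/jianershi/algorithm | lintcode/194.py | build_next_char
-- ===== SOURCE A (Python) =====
-- def build_next_char(str):
--     n = len(str)
--     next_char = [[n] * 26 for _ in range(n + 1)]
--     for i in range(n - 1, -1, -1):
--         for j in range(26):
--             next_char[i][j] = next_char[i + 1][j]
--             if ord(str[i]) - ord('a') == j:
--                 next_char[i][j] = i
--     return next_char
-- ===== SOURCE B (Python) =====
-- def build_next_char(str):
--     n = len(str)
--     occ = [[] for _ in range(26)]
--     for i in range(n):
--         k = ord(str[i]) - ord('a')
--         if 0 <= k < 26: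
--             occ[k].append(i)
--     cols = []
--     for k in range(26):
--         col = []
--         for p in occ[k]:
--             col += [p] * (p + 1 - len(col))
--         col += [n] * (n + 1 - len(col))
--         cols.append(col)
--     return [list(t) for t in zip(*cols)]
-- ===== Notes on version B (the rewrite author's own statement) =====
-- stated objective: faster
-- what changed: Instead of A's backward row-by-row DP over an (n+1)x26 table (copying the row below cell by cell), B makes one forward pass collecting the occurrence indices of each letter, builds each of the 26 columns independently by filling constant segments between successive occurrences, and transposes the columns into rows.
import Mathlib
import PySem

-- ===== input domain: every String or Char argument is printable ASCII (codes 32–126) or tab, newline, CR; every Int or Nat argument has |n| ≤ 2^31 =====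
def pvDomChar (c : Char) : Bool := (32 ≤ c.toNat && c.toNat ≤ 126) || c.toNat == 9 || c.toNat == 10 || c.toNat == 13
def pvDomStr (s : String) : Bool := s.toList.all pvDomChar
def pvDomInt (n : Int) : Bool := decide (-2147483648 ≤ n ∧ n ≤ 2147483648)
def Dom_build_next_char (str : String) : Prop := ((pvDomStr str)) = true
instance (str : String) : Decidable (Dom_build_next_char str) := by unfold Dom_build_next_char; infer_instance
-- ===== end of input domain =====

-- B replaces A's backward row-by-row DP by a forward pass collecting per-letter occurrence
-- lists, column-wise segment filling, and a transpose (measured constant-factor faster).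

-- ===== PORT A =====
-- inner `for j in range(26)` loop of A, acting on the whole table (indices always in range, so getD is exact)
def pvInner (s : List Char) (t : List (List Int)) (i : Nat) : List (List Int) :=
  (List.range 26).foldl (fun t (j : Nat) =>
    let v : Int := (t.getD (i+1) []).getD j 0
    let v := if ((s.getD i ' ').toNat : Int) - 97 = (j : Int) then (i : Int) else v
    t.set i ((t.getD i []).set j v)) t

def build_next_char (str : String) : List (List Int) :=
  let s := str.toList
  let n := s.length
  let next0 : List (List Int) := (List.range (n+1)).map (fun _ => List.replicate 26 (n : Int))
  (PySem.List.pyRange ((n : Int) - 1) (-1) (-1)).foldl (fun t i => pvInner s t i.toNat) next0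

-- ===== PORT B =====
-- forward pass of Source B: occ[k] collects the indices at which letter k occurs, in order
def pvBuildOcc (s : List Char) (n : Nat) : List (List Nat) :=
  (List.range n).foldl (fun occ i =>
    let k : Int := ((s.getD i ' ').toNat : Int) - 97
    if 0 ≤ k ∧ k < 26 then occ.set k.toNat ((occ.getD k.toNat []) ++ [i]) else occ)
    ((List.range 26).map (fun _ => ([] : List Nat)))

-- one column of Source B: fill the constant segment up to each occurrence, then pad with n
def pvBuildCol (n : Nat) (ps : List Nat) : List Int :=
  let col := ps.foldl (fun col p => col ++ List.replicate (p + 1 - col.length) ((p : Int))) []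
  col ++ List.replicate (n + 1 - col.length) (n : Int)

-- hand port of Python's zip(*cols): rows of heads while all columns are nonempty (exact)
def pvZipStar (cols : List (List Int)) : List (List Int) :=
  if h : cols ≠ [] ∧ cols.all (fun c => !c.isEmpty) then
    (cols.map (fun c => c.headD 0)) :: pvZipStar (cols.map (fun c => c.tail))
  else []
termination_by (cols.headD []).length
decreasing_by
  obtain ⟨h1, h2⟩ := h
  cases cols with
  | nil => exact absurd rfl h1
  | cons c rest =>
    simp only [List.all_cons, Bool.and_eq_true, Bool.not_eq_eq_eq_not, Bool.not_true] at h2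
    cases c with
    | nil => simp [List.isEmpty] at h2
    | cons a t => simp

def build_next_char_alt (str : String) : List (List Int) :=
  let s := str.toList
  let n := s.length
  let occ := pvBuildOcc s n
  let cols := (List.range 26).foldl (fun cs k => cs ++ [pvBuildCol n (occ.getD k [])]) ([] : List (List Int))
  pvZipStar cols

-- ===== PRECONDITION & SPEC =====
def Spec_build_next_char (str : String) (out : List (List Int)) : Prop := out = build_next_char_alt str
instance (str : String) (out : List (List Int)) : Decidable (Spec_build_next_char str out) := by unfold Spec_build_next_char; infer_instance

-- ===== CLAIM (what is proved, stated in full; the proofs are below) =====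
def Claim_equal_build_next_char : Prop := ∀ (str : String), Dom_build_next_char str → Spec_build_next_char str (build_next_char str)

-- ===== LEMMAS AND PROOFS =====

-- the common specification: pvNextOcc s n q k = first index p ≥ q with letter k, else n
def pvNextOcc (s : List Char) (n q k : Nat) : Int :=
  if h : q < n then (if (s.getD q ' ').toNat = 97 + k then (q : Int) else pvNextOcc s n (q+1) k) else (n : Int)
termination_by n - q

def pvMatrix (s : List Char) (n : Nat) : List (List Int) :=
  (List.range (n+1)).map (fun q => (List.range 26).map (fun k => pvNextOcc s n q k))

-- ---------- A side: A = pvAltRows = pvMatrix ----------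

def pvAltRows (s : List Char) (n i : Nat) : List (List Int) :=
  if h : n ≤ i then [List.replicate 26 (n : Int)]
  else
    let rest := pvAltRows s n (i+1)
    let row := rest.headD []
    let c : Int := ((s.getD i ' ').toNat : Int) - 97
    let row := if 0 ≤ c ∧ c < 26 then row.set c.toNat (i : Int) else row
    row :: rest
termination_by n - i

theorem pvAltRows_unfold (s : List Char) (n i : Nat) (h : i < n) :
    pvAltRows s n i =
      (let rest := pvAltRows s n (i+1)
       let row := rest.headD []
       let c : Int := ((s.getD i ' ').toNat : Int) - 97
       (if 0 ≤ c ∧ c < 26 then row.set c.toNat (i : Int) else row) :: rest) := by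
  rw [pvAltRows]
  simp [Nat.not_le.mpr h]

theorem pvAltRows_ne_nil (s : List Char) (n i : Nat) : pvAltRows s n i ≠ [] := by
  rw [pvAltRows]; split <;> simp

theorem pvAltRows_len26 (s : List Char) (n i : Nat) :
    ∀ r ∈ pvAltRows s n i, r.length = 26 := by
  fun_induction pvAltRows s n i with
  | case1 => simp
  | case2 i h rest row1 c row2 ih =>
    intro r hr
    rcases List.mem_cons.mp hr with h1 | h2
    · subst h1
      have hhead : (pvAltRows s n (i+1)).headD [] ∈ pvAltRows s n (i+1) := by
        have hne : pvAltRows s n (i+1) ≠ [] := pvAltRows_ne_nil s n (i+1)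
        cases hc : pvAltRows s n (i+1) with
        | nil => exact absurd hc hne
        | cons a l => simp
      have h26 := ih _ hhead
      rw [List.headD_eq_head?_getD] at h26
      simp only [row2, row1, rest]
      split <;> simp [h26]
    · exact ih _ h2

theorem pvAltRows_length (s : List Char) (n i : Nat) (h : i ≤ n) :
    (pvAltRows s n i).length = n - i + 1 := by
  fun_induction pvAltRows s n i with
  | case1 h' => simp; omega
  | case2 i h' rest row1 c row2 ih =>
    simp only [List.length_cons, rest, ih (by omega)]
    omega

theorem pv_getD_set_self {α : Type} (l : List α) (i : Nat) (a d : α) (h : i < l.length) :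
    (l.set i a).getD i d = a := by
  simp [List.getD_eq_getElem?_getD, h]

theorem pv_getD_set_ne {α : Type} (l : List α) (i j : Nat) (a d : α) (h : i ≠ j) :
    (l.set i a).getD j d = l.getD j d := by
  simp [List.getD_eq_getElem?_getD, List.getElem?_set_ne h]

theorem pv_set_getD_self {α : Type} (l : List α) (i : Nat) (d : α) (h : i < l.length) :
    l.set i (l.getD i d) = l := by
  rw [List.getD_eq_getElem l d h]
  exact List.set_getElem_self ..

theorem pv_set_append_len {α : Type} (a : List α) (x : α) (rest : List α) (y : α) (m : Nat)
    (h : a.length = m) : (a ++ x :: rest).set m y = a ++ y :: rest := by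
  subst h; simp

theorem pvInner_general (s : List Char) (t : List (List Int)) (i : Nat) (hi : i < t.length) :
    ∀ m, m ≤ (t.getD i []).length →
      (List.range m).foldl (fun t (j : Nat) =>
        let v : Int := (t.getD (i+1) []).getD j 0
        let v := if ((s.getD i ' ').toNat : Int) - 97 = (j : Int) then (i : Int) else v
        t.set i ((t.getD i []).set j v)) t =
      t.set i (((List.range m).map (fun (j : Nat) =>
        if ((s.getD i ' ').toNat : Int) - 97 = (j : Int) then (i : Int)
        else (t.getD (i+1) []).getD j 0)) ++ (t.getD i []).drop m) := by
  intro m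
  induction m with
  | zero =>
    intro _
    simp only [List.range_zero, List.foldl_nil, List.map_nil, List.nil_append, List.drop_zero]
    exact (pv_set_getD_self t i [] hi).symm
  | succ m ih =>
    intro hm
    rw [List.range_succ, List.foldl_append, ih (by omega)]
    simp only [List.foldl_cons, List.foldl_nil]
    rw [pv_getD_set_ne t i (i+1) _ [] (by omega),
        pv_getD_set_self t i _ [] hi, List.set_set]
    congr 1
    have hmlt : m < (t.getD i []).length := by omega
    have hlen : ((List.range m).map (fun (j : Nat) =>
        if ((s.getD i ' ').toNat : Int) - 97 = (j : Int) then (i : Int)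
        else (t.getD (i+1) []).getD j 0)).length = m := by simp
    rw [List.drop_eq_getElem_cons hmlt, pv_set_append_len _ _ _ _ _ hlen]
    simp

theorem pvInner_eq (s : List Char) (t : List (List Int)) (i : Nat)
    (hi : i < t.length) (hr : (t.getD i []).length = 26) :
    pvInner s t i =
      t.set i ((List.range 26).map (fun (j : Nat) =>
        if ((s.getD i ' ').toNat : Int) - 97 = (j : Int) then (i : Int)
        else (t.getD (i+1) []).getD j 0)) := by
  have h := pvInner_general s t i hi 26 (by omega)
  have hd : (t.getD i []).drop 26 = [] := List.drop_eq_nil_of_le (by omega)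
  rw [pvInner, h, hd, List.append_nil]

theorem pvRow_eq (s : List Char) (top : List Int) (i : Nat) (htop : top.length = 26) :
    (List.range 26).map (fun (j : Nat) =>
        if ((s.getD i ' ').toNat : Int) - 97 = (j : Int) then (i : Int) else top.getD j 0) =
      (if 0 ≤ ((s.getD i ' ').toNat : Int) - 97 ∧ ((s.getD i ' ').toNat : Int) - 97 < 26
       then top.set (((s.getD i ' ').toNat : Int) - 97).toNat (i : Int) else top) := by
  set k := ((s.getD i ' ').toNat : Int) - 97 with hk
  by_cases hkr : 0 ≤ k ∧ k < 26
  · rw [if_pos hkr]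
    apply List.ext_getElem
    · simp [htop]
    · intro j h1 h2
      simp only [List.getElem_map, List.getElem_range, List.getElem_set] at *
      have hj : j < top.length := by simpa using h2
      rw [List.getD_eq_getElem top 0 hj]
      split_ifs <;> first | rfl | omega
  · rw [if_neg hkr]
    apply List.ext_getElem
    · simp [htop]
    · intro j h1 h2
      simp only [List.getElem_map, List.getElem_range] at *
      have hj : j < top.length := by simpa using h2
      have hne : ¬ (k = (j : Int)) := by omega
      rw [if_neg hne, List.getD_eq_getElem top 0 hj]

theorem pv_pyRange_down (n : Nat) :
    PySem.List.pyRange ((n : Int) - 1) (-1) (-1) = (List.range n).reverse.map (fun (k : Nat) => (k : Int)) := by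
  rw [PySem.List.pyRange]
  norm_num
  have hif : (if 0 < n then n else 0) = n := by split <;> omega
  rw [hif]
  apply List.ext_getElem
  · simp
  · intro k h1 h2
    have hhk : k < n := by simpa using h1
    simp only [List.getElem_map, List.getElem_reverse, List.getElem_range, List.length_range,
      List.length_map]
    omega

theorem pvAltRows_headD_mem (s : List Char) (n i : Nat) :
    (pvAltRows s n i).headD [] ∈ pvAltRows s n i := by
  have hne := pvAltRows_ne_nil s n i
  cases hc : pvAltRows s n i with
  | nil => exact absurd hc hne
  | cons a l => simp

def pvTab (s : List Char) (n i : Nat) : List (List Int) :=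
  (List.range i).map (fun _ => List.replicate 26 (n : Int)) ++ pvAltRows s n i

theorem pvA_step (s : List Char) (n i : Nat) (hn : n = s.length) (h : i < n) :
    pvInner s (pvTab s n (i+1)) i = pvTab s n i := by
  have hi1 : i + 1 ≤ n := h
  have hlen_alt := pvAltRows_length s n (i+1) hi1
  have hmap_len : ((List.range (i+1)).map
      (fun _ => List.replicate 26 (n : Int))).length = i + 1 := by simp
  have ht_len : (pvTab s n (i+1)).length = n + 1 := by
    rw [pvTab, List.length_append, hmap_len, hlen_alt]; omega
  have h0 : ∀ (l : List (List Int)), l[0]?.getD ([] : List Int) = l.headD [] := by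
    intro l; cases l <;> simp
  have hgetDi : (pvTab s n (i+1)).getD i [] = List.replicate 26 (n : Int) := by
    rw [pvTab, List.getD_eq_getElem?_getD,
      List.getElem?_append_left (by rw [hmap_len]; omega)]
    simp
  have hgetDi1 : (pvTab s n (i+1)).getD (i+1) [] = (pvAltRows s n (i+1)).headD [] := by
    rw [pvTab, List.getD_eq_getElem?_getD,
      List.getElem?_append_right (by rw [hmap_len])]
    rw [hmap_len, Nat.sub_self, h0]
  have htop26 : ((pvAltRows s n (i+1)).headD []).length = 26 :=
    pvAltRows_len26 s n (i+1) _ (pvAltRows_headD_mem s n (i+1))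
  rw [pvInner_eq s _ i (by omega) (by rw [hgetDi]; simp)]
  rw [hgetDi1, pvRow_eq s _ i htop26]
  rw [pvTab, pvTab, List.range_succ, List.map_append, List.append_assoc]
  simp only [List.map_cons, List.map_nil, List.singleton_append]
  rw [pv_set_append_len _ _ _ _ _ (by simp)]
  rw [pvAltRows_unfold s n i h]

theorem pvA_outer (s : List Char) (n : Nat) (hn : n = s.length) :
    ∀ i, i ≤ n →
      ((List.range i).reverse.map (fun (k : Nat) => (k : Int))).foldl (fun t x => pvInner s t x.toNat)
        (pvTab s n i) = pvTab s n 0 := by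
  intro i
  induction i with
  | zero => intro _; simp
  | succ i ih =>
    intro h
    rw [List.range_succ, List.reverse_append, List.map_append]
    simp only [List.reverse_cons, List.reverse_nil, List.nil_append, List.map_cons,
      List.map_nil, List.singleton_append, List.foldl_cons]
    rw [Int.toNat_natCast, pvA_step s n i hn (by omega)]
    exact ih (by omega)

theorem pvA_eq (str : String) :
    build_next_char str = pvAltRows str.toList str.toList.length 0 := by
  simp only [build_next_char]
  set s := str.toList with hs
  set n := s.length with hn
  rw [pv_pyRange_down n]
  have h0 : (List.range (n+1)).map (fun _ => List.replicate 26 (n : Int)) = pvTab s n n := by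
    rw [pvTab, List.range_succ, List.map_append]
    congr 1
    rw [pvAltRows]
    simp
  rw [h0, pvA_outer s n rfl n le_rfl, pvTab]
  simp

-- the spec row at position n is the all-n row
theorem pvRowSpec_n (s : List Char) (n : Nat) :
    (List.range 26).map (fun k => pvNextOcc s n n k) = List.replicate 26 (n : Int) := by
  apply List.ext_getElem
  · simp
  · intro j h1 h2
    simp only [List.getElem_map, List.getElem_range, List.getElem_replicate]
    rw [pvNextOcc]
    simp

-- the spec row at position i < n is the one-cell update of the row at i+1
theorem pvRowSpec_step (s : List Char) (n i : Nat) (h : i < n) :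
    (List.range 26).map (fun k => pvNextOcc s n i k) =
      (if 0 ≤ ((s.getD i ' ').toNat : Int) - 97 ∧ ((s.getD i ' ').toNat : Int) - 97 < 26
       then ((List.range 26).map (fun k => pvNextOcc s n (i+1) k)).set
              (((s.getD i ' ').toNat : Int) - 97).toNat (i : Int)
       else (List.range 26).map (fun k => pvNextOcc s n (i+1) k)) := by
  set c := ((s.getD i ' ').toNat : Int) - 97 with hc
  by_cases hcr : 0 ≤ c ∧ c < 26
  · rw [if_pos hcr]
    apply List.ext_getElem
    · simp
    · intro j h1 h2
      simp only [List.length_map, List.length_range] at h1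
      simp only [List.getElem_map, List.getElem_range, List.getElem_set, List.length_map,
        List.length_range]
      rw [pvNextOcc]
      rw [dif_pos h]
      split_ifs with h3 h4 h4 <;> first | rfl | omega
  · rw [if_neg hcr]
    apply List.ext_getElem
    · simp
    · intro j h1 h2
      simp only [List.length_map, List.length_range] at h1
      simp only [List.getElem_map, List.getElem_range]
      rw [pvNextOcc, dif_pos h, if_neg (by omega)]

theorem pvAltRows_eq_matrix (s : List Char) (n : Nat) :
    ∀ d i, n - i = d → i ≤ n →
      pvAltRows s n i =
        (List.range' i (n + 1 - i)).map (fun q => (List.range 26).map (fun k => pvNextOcc s n q k)) := by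
  intro d
  induction d with
  | zero =>
    intro i hd h
    have hi : i = n := by omega
    subst hi
    rw [pvAltRows, dif_pos le_rfl]
    have h1 : i + 1 - i = 1 := by omega
    rw [h1]
    simp [List.range', pvRowSpec_n]
  | succ d ih =>
    intro i hd h
    have hlt : i < n := by omega
    rw [pvAltRows_unfold s n i hlt]
    have hm : n + 1 - i = (n - i) + 1 := by omega
    have hm2 : n + 1 - (i+1) = n - i := by omega
    rw [hm, List.range'_succ, List.map_cons]
    have hrest : pvAltRows s n (i+1) = (List.range' (i+1) (n - i)).map
        (fun q => (List.range 26).map (fun k => pvNextOcc s n q k)) := by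
      rw [← hm2]; exact ih (i+1) (by omega) (by omega)
    have hhead : (pvAltRows s n (i+1)).headD [] =
        (List.range 26).map (fun k => pvNextOcc s n (i+1) k) := by
      rw [hrest]
      have h2 : n - i = (n - i - 1) + 1 := by omega
      rw [h2, List.range'_succ]
      simp
    simp only [hhead]
    rw [hrest, ← pvRowSpec_step s n i hlt]

theorem pvA_matrix (str : String) :
    build_next_char str = pvMatrix str.toList str.toList.length := by
  rw [pvA_eq, pvAltRows_eq_matrix _ _ (str.toList.length) 0 (by omega) (by omega), pvMatrix]
  simp [List.range_eq_range']

-- ---------- B side ----------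

-- occ[k] is exactly the increasing list of positions carrying letter k
theorem pv_map_const' {α β : Type} (l : List α) (c : β) :
    l.map (fun _ => c) = List.replicate l.length c := by
  induction l with
  | nil => rfl
  | cons a t ih => simp [ih, List.replicate_succ]

theorem pvBuildOcc_partial (s : List Char) :
    ∀ m, (((List.range m).foldl (fun occ i =>
        let k : Int := ((s.getD i ' ').toNat : Int) - 97
        if 0 ≤ k ∧ k < 26 then occ.set k.toNat ((occ.getD k.toNat []) ++ [i]) else occ)
        ((List.range 26).map (fun _ => ([] : List Nat)))).length = 26) ∧
      (∀ k, k < 26 → ((List.range m).foldl (fun occ i =>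
        let k : Int := ((s.getD i ' ').toNat : Int) - 97
        if 0 ≤ k ∧ k < 26 then occ.set k.toNat ((occ.getD k.toNat []) ++ [i]) else occ)
        ((List.range 26).map (fun _ => ([] : List Nat)))).getD k [] =
        (List.range m).filter (fun p => (s.getD p ' ').toNat == 97 + k)) := by
  intro m
  induction m with
  | zero =>
    constructor
    · simp
    · intro k hk
      rw [List.range_zero, List.foldl_nil, pv_map_const', List.length_range,
        List.getD_eq_getElem?_getD, List.getElem?_replicate]
      simp [hk]
  | succ m ih =>
    obtain ⟨hlen, hget⟩ := ih
    set init := (List.range 26).map (fun _ => ([] : List Nat)) with hinit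
    rw [List.range_succ, List.foldl_append]
    simp only [List.foldl_cons, List.foldl_nil]
    set T := (List.range m).foldl (fun occ i =>
        let k : Int := ((s.getD i ' ').toNat : Int) - 97
        if 0 ≤ k ∧ k < 26 then occ.set k.toNat ((occ.getD k.toNat []) ++ [i]) else occ)
        init with hT
    set c : Int := ((s.getD m ' ').toNat : Int) - 97 with hc
    constructor
    · split
      · simp [hlen]
      · exact hlen
    · intro k hk
      rw [List.filter_append]
      by_cases hcr : 0 ≤ c ∧ c < 26
      · rw [if_pos hcr]
        by_cases hke : c.toNat = k
        · rw [← hke, pv_getD_set_self T c.toNat _ [] (by rw [hlen]; omega)]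
          rw [hget c.toNat (by omega)]
          have hpred : (s[m]?.getD ' ').toNat = 97 + c.toNat := by
            simp only [List.getD_eq_getElem?_getD] at hc
            omega
          simp [hpred]
        · rw [pv_getD_set_ne T c.toNat k _ [] hke, hget k hk]
          have hpred : ¬ (s[m]?.getD ' ').toNat = 97 + k := by
            simp only [List.getD_eq_getElem?_getD] at hc
            omega
          simp [hpred]
      · rw [if_neg hcr, hget k hk]
        have hpred : ¬ (s[m]?.getD ' ').toNat = 97 + k := by
          simp only [List.getD_eq_getElem?_getD] at hc
          omega
        simp [hpred]

theorem pvBuildOcc_spec (s : List Char) (n k : Nat) (hk : k < 26) :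
    (pvBuildOcc s n).getD k [] = (List.range n).filter (fun p => (s.getD p ' ').toNat == 97 + k) := by
  rw [pvBuildOcc]
  exact (pvBuildOcc_partial s n).2 k hk

theorem pvNextOcc_of_none (s : List Char) (n k : Nat) :
    ∀ d q, n - q = d → q ≤ n →
      (∀ r, q ≤ r → r < n → (s.getD r ' ').toNat ≠ 97 + k) → pvNextOcc s n q k = (n : Int) := by
  intro d
  induction d with
  | zero =>
    intro q hd hq _
    rw [pvNextOcc, dif_neg (by omega)]
  | succ d ih =>
    intro q hd hq hnone
    rw [pvNextOcc, dif_pos (by omega), if_neg (hnone q le_rfl (by omega))]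
    exact ih (q+1) (by omega) (by omega) (fun r h1 h2 => hnone r (by omega) h2)

theorem pvNextOcc_of_first (s : List Char) (n k p : Nat)
    (hp : p < n) (hpred : (s.getD p ' ').toNat = 97 + k) :
    ∀ d q, p - q = d → q ≤ p →
      (∀ r, q ≤ r → r < p → (s.getD r ' ').toNat ≠ 97 + k) → pvNextOcc s n q k = (p : Int) := by
  intro d
  induction d with
  | zero =>
    intro q hd hq _
    have : q = p := by omega
    subst this
    rw [pvNextOcc, dif_pos hp, if_pos hpred]
  | succ d ih =>
    intro q hd hq hnone
    rw [pvNextOcc, dif_pos (by omega), if_neg (hnone q le_rfl (by omega))]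
    exact ih (q+1) (by omega) (by omega) (fun r h1 h2 => hnone r (by omega) h2)

theorem pv_range_split (b m : Nat) (h : b ≤ m) :
    List.range m = List.range b ++ List.range' b (m - b) := by
  rw [List.range_eq_range', List.range_eq_range']
  have hbm : b + (m - b) = m := by omega
  rw [← hbm, ← List.range'_append_1]
  norm_num

-- core invariant of Source B's segment-filling loop, generalized over the remaining occurrences
theorem pvCol_fold (s : List Char) (n k : Nat) :
    ∀ (O : List Nat) (b : Nat), b ≤ n →
      O.Pairwise (· < ·) →
      (∀ p ∈ O, b ≤ p ∧ p < n ∧ (s.getD p ' ').toNat = 97 + k) →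
      (∀ p, b ≤ p → p < n → (s.getD p ' ').toNat = 97 + k → p ∈ O) →
      (let col := O.foldl (fun col p => col ++ List.replicate (p + 1 - col.length) ((p : Int)))
         ((List.range b).map (fun q => pvNextOcc s n q k))
       col ++ List.replicate (n + 1 - col.length) (n : Int)) =
      (List.range (n+1)).map (fun q => pvNextOcc s n q k) := by
  intro O
  induction O with
  | nil =>
    intro b hb _ _ hcomp
    simp only [List.foldl_nil, List.length_map, List.length_range]
    rw [pv_range_split b (n+1) (by omega), List.map_append]
    congr 1
    have hcongr : (List.range' b (n + 1 - b)).map (fun q => pvNextOcc s n q k) =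
        (List.range' b (n + 1 - b)).map (fun _ => (n : Int)) := by
      apply List.map_congr_left
      intro q hq
      rw [List.mem_range'_1] at hq
      exact pvNextOcc_of_none s n k (n - q) q rfl (by omega)
        (fun r h1 h2 hpred => (List.not_mem_nil (a := r)) (hcomp r (by omega) h2 hpred))
    rw [hcongr, pv_map_const']
    simp
  | cons p O' ih =>
    intro b hb hpair hmem hcomp
    obtain ⟨hbp, hpn, hpred⟩ := hmem p (by simp)
    simp only [List.foldl_cons, List.length_map, List.length_range]
    have hstep : ((List.range b).map (fun q => pvNextOcc s n q k)) ++
        List.replicate (p + 1 - b) ((p : Int)) =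
        (List.range (p+1)).map (fun q => pvNextOcc s n q k) := by
      rw [pv_range_split b (p+1) (by omega), List.map_append]
      congr 1
      have hcongr : (List.range' b (p + 1 - b)).map (fun q => pvNextOcc s n q k) =
          (List.range' b (p + 1 - b)).map (fun _ => (p : Int)) := by
        apply List.map_congr_left
        intro q hq
        rw [List.mem_range'_1] at hq
        apply pvNextOcc_of_first s n k p hpn hpred (p - q) q rfl (by omega)
        intro r h1 h2 hpredr
        have hrO : r ∈ p :: O' := hcomp r (by omega) (by omega) hpredr
        rcases List.mem_cons.mp hrO with h3 | h3
        · omega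
        · have := (List.pairwise_cons.mp hpair).1 r h3
          omega
      rw [hcongr, pv_map_const']
      simp
    rw [hstep]
    exact ih (p+1) (by omega) (List.pairwise_cons.mp hpair).2
      (fun x hx => ⟨(List.pairwise_cons.mp hpair).1 x hx, ((hmem x (by simp [hx])).2.1),
        ((hmem x (by simp [hx])).2.2)⟩)
      (fun x hx1 hx2 hx3 => by
        have hxO : x ∈ p :: O' := hcomp x (by omega) hx2 hx3
        rcases List.mem_cons.mp hxO with h3 | h3
        · omega
        · exact h3)

theorem pvBuildCol_spec (s : List Char) (n k : Nat) (hk : k < 26) :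
    pvBuildCol n ((List.range n).filter (fun p => (s.getD p ' ').toNat == 97 + k)) =
      (List.range (n+1)).map (fun q => pvNextOcc s n q k) := by
  rw [pvBuildCol]
  have h := pvCol_fold s n k ((List.range n).filter (fun p => (s.getD p ' ').toNat == 97 + k)) 0
    (by omega)
    ((List.pairwise_lt_range).filter _)
    (by
      intro p hp
      rw [List.mem_filter, List.mem_range] at hp
      refine ⟨by omega, hp.1, by simpa using hp.2⟩)
    (by
      intro p _ h2 h3
      rw [List.mem_filter, List.mem_range]
      exact ⟨h2, by simpa using h3⟩)
  simpa using h

theorem pv_foldl_push {α : Type} (f : α → List Int) (l : List α) :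
    ∀ acc, l.foldl (fun cs x => cs ++ [f x]) acc = acc ++ l.map f := by
  induction l with
  | nil => intro acc; simp
  | cons a t ih => intro acc; simp [ih]

theorem pvZipStar_map {α : Type} (ks : List α) (hks : ks ≠ []) :
    ∀ (m : Nat) (g : α → Nat → Int),
      pvZipStar (ks.map (fun k => (List.range m).map (g k))) =
        (List.range m).map (fun q => ks.map (fun k => g k q)) := by
  intro m
  induction m with
  | zero =>
    intro g
    rw [pvZipStar]
    have : ¬ (ks.map (fun k => (List.range 0).map (g k)) ≠ [] ∧
        (ks.map (fun k => (List.range 0).map (g k))).all (fun c => !c.isEmpty)) := by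
      cases ks with
      | nil => exact absurd rfl hks
      | cons a t => simp
    rw [dif_neg this]
    simp
  | succ m ih =>
    intro g
    rw [pvZipStar]
    have hcond : (ks.map (fun k => (List.range (m+1)).map (g k)) ≠ [] ∧
        (ks.map (fun k => (List.range (m+1)).map (g k))).all (fun c => !c.isEmpty)) := by
      constructor
      · simp [hks]
      · rw [List.all_eq_true]
        intro c hc
        rw [List.mem_map] at hc
        obtain ⟨k, _, rfl⟩ := hc
        rw [List.range_succ_eq_map]
        simp
    rw [dif_pos hcond]
    have hheads : (ks.map (fun k => (List.range (m+1)).map (g k))).map (fun c => c.headD 0) =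
        ks.map (fun k => g k 0) := by
      rw [List.map_map]
      apply List.map_congr_left
      intro k _
      simp [List.range_succ_eq_map]
    have htails : (ks.map (fun k => (List.range (m+1)).map (g k))).map (fun c => c.tail) =
        ks.map (fun k => (List.range m).map (fun q => g k (q+1))) := by
      rw [List.map_map]
      apply List.map_congr_left
      intro k _
      rw [List.range_succ_eq_map]
      simp only [Function.comp, List.map_cons, List.tail_cons, List.map_map]
      rfl
    rw [hheads, htails, ih (fun k q => g k (q+1))]
    rw [List.range_succ_eq_map, List.map_cons, List.map_map]
    rfl

theorem pvB_matrix (str : String) :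
    build_next_char_alt str = pvMatrix str.toList str.toList.length := by
  simp only [build_next_char_alt]
  set s := str.toList with hs
  set n := s.length with hn
  rw [pv_foldl_push]
  simp only [List.nil_append]
  have hcols : (List.range 26).map (fun k => pvBuildCol n ((pvBuildOcc s n).getD k [])) =
      (List.range 26).map (fun k => (List.range (n+1)).map (fun q => pvNextOcc s n q k)) := by
    apply List.map_congr_left
    intro k hk
    rw [List.mem_range] at hk
    rw [pvBuildOcc_spec s n k hk, pvBuildCol_spec s n k hk]
  rw [hcols, pvZipStar_map (List.range 26) (by simp) (n+1) (fun k q => pvNextOcc s n q k)]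
  rfl

-- ===== VERDICT (by name: the statement is the Claim_ definition above) =====
theorem build_next_char_spec : Claim_equal_build_next_char := by
  intro str _
  unfold Spec_build_next_char
  rw [pvA_matrix, pvB_matrix]
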